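-- pv_equiv track=rewrite | github.com/canidlogic/langtag | makelist.py | check_code
-- ===== SOURCE A (Python) =====
-- def check_code(sval):
--
--   # Check that parameter is string
--   if not isinstance(sval, str):
--     return False
--
--   # Check length of parameter and proceed
--   if len(sval) == 2:
--     # Two-character code, check that both are lowercase ASCII letters
--     for cv in sval:
--       c = ord(cv)
--       if (c < ord('a')) or (c > ord('z')):
--         return False
--
--   elif len(sval) == 3:
--     # Three-character code, check that all are lowercase ASCII letters
--     for cv in sval:
--       c = ord(cv)
--       if (c < ord('a')) or (c > ord('z')):
--         return False
--
--   else: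
--     # Invalid length of code
--     return False
--
--   # If we got here, check passes
--   return True
-- ===== SOURCE B (Python) =====
-- import re
--
-- def check_code(sval):
--   # Non-strings are invalid codes (and would make re.fullmatch raise).
--   if not isinstance(sval, str):
--     return False
--   # Exactly 2 or 3 lowercase ASCII letters, in one regex match.
--   return re.fullmatch(r'[a-z]{2,3}', sval) is not None
-- ===== Notes on version B (the rewrite author's own statement) =====
-- stated objective: idiomatic
-- what changed: Replaces the length branching with duplicated per-character ord() loops by a single regex fullmatch of [a-z]{2,3}.
import Mathlib
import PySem

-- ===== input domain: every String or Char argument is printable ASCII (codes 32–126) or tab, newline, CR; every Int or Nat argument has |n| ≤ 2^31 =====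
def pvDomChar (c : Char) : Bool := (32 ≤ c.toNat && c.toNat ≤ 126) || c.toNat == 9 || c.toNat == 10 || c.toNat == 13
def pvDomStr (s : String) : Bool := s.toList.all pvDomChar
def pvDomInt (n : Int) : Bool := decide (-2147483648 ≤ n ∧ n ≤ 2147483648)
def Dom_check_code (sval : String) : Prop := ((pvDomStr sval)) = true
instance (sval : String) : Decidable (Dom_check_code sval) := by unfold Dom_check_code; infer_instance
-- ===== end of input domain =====

-- B replaces A's length branching with duplicated per-character ord() loops by a single regex fullmatch of [a-z]{2,3} (idiomatic; same cost).


-- ===== PORT A =====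
-- the 'for cv in sval' loop with early 'return False': returns false as soon as a
-- character is outside 'a'..'z', true if the loop finishes
def checkCodeLoopA : List Char → Bool
  | [] => true
  | cv :: rest =>
      if cv.toNat < 'a'.toNat ∨ cv.toNat > 'z'.toNat then false else checkCodeLoopA rest

def check_code (sval : String) : Bool :=
  if PySem.Str.len sval = 2 then
    checkCodeLoopA sval.toList
  else if PySem.Str.len sval = 3 then
    checkCodeLoopA sval.toList
  else
    false

-- ===== PORT B =====
-- re.fullmatch(r'[a-z]{2,3}', sval): length 2 or 3 and every character in the class a-z
def check_code_alt (sval : String) : Bool :=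
  (2 ≤ PySem.Str.len sval && PySem.Str.len sval ≤ 3)
    && sval.toList.all (fun c => 'a' ≤ c && c ≤ 'z')

-- ===== PRECONDITION & SPEC =====
def Spec_check_code (sval : String) (out : Bool) : Prop := out = check_code_alt sval
instance (sval : String) (out : Bool) : Decidable (Spec_check_code sval out) := by unfold Spec_check_code; infer_instance

-- ===== CLAIM (what is proved, stated in full; the proofs are below) =====
def Claim_equal_check_code : Prop := ∀ (sval : String), Dom_check_code sval → Spec_check_code sval (check_code sval)

-- ===== LEMMAS AND PROOFS =====
theorem checkCodeLoopA_eq_all (xs : List Char) :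
    checkCodeLoopA xs = xs.all (fun c => 'a' ≤ c && c ≤ 'z') := by
  induction xs with
  | nil => rfl
  | cons c rest ih =>
      simp only [checkCodeLoopA, List.all_cons, ih]
      by_cases h : c.toNat < 'a'.toNat ∨ c.toNat > 'z'.toNat
      · simp only [if_pos h]
        rcases h with h | h
        · have hn : ¬ ('a' ≤ c) := by
            simp only [Char.le_def, UInt32.le_iff_toNat_le]
            simp only [Char.toNat] at h
            omega
          simp [hn]
        · have hn : ¬ (c ≤ 'z') := by
            simp only [Char.le_def, UInt32.le_iff_toNat_le]
            simp only [Char.toNat] at h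
            omega
          simp [hn]
      · rw [if_neg h]
        rcases not_or.mp h with ⟨ha, hz⟩
        have h1 : 'a' ≤ c := by
          simp only [Char.le_def, UInt32.le_iff_toNat_le]
          simp only [Char.toNat] at ha
          omega
        have h2 : c ≤ 'z' := by
          simp only [Char.le_def, UInt32.le_iff_toNat_le]
          simp only [Char.toNat] at hz
          omega
        simp [h1, h2]

-- ===== VERDICT (by name: the statement is the Claim_ definition above) =====
theorem check_code_spec : Claim_equal_check_code := by
  intro sval _
  unfold Spec_check_code check_code check_code_alt PySem.Str.len
  rw [checkCodeLoopA_eq_all]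
  by_cases h2 : sval.toList.length = 2
  · simp [h2]
  · by_cases h3 : sval.toList.length = 3
    · simp [h3]
    · have e2 : ¬ ((sval.toList.length : Int) = 2) := by omega
      have e3 : ¬ ((sval.toList.length : Int) = 3) := by omega
      rw [if_neg e2, if_neg e3]
      have hb : (decide ((2:Int) ≤ ↑sval.toList.length) && decide ((sval.toList.length : Int) ≤ 3)) = false := by
        simp only [Bool.and_eq_false_iff, decide_eq_false_iff_not]
        omega
      rw [hb, Bool.false_and]
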